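-- pv_equiv track=rewrite | github.com/4045-NLP/CZ4045 | code 3.3/noun_phrase_detector.py | change_tag
-- ===== SOURCE A (Python) =====
-- def change_tag(tokens, tagged_t):
-- 	for w in tokens:
-- 		if w == 'i':
-- 			tagged_t[tokens.index(w)] = (w, 'PRP')
-- 		if w in ['don', 'doesn','didn']:
-- 			tagged_t[tokens.index(w)] = (w, 'VB')
-- 		if w in ['wouldn', 'shouldn','couldn']:
-- 			tagged_t[tokens.index(w)] = (w, 'MD')
-- 		if w == '\'t':
-- 			tagged_t[tokens.index(w)] = (w, 'POS')
-- 	return tagged_t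
-- ===== SOURCE B (Python) =====
-- TAG_MAP = {'i': 'PRP', 'don': 'VB', 'doesn': 'VB', 'didn': 'VB',
--            'wouldn': 'MD', 'shouldn': 'MD', 'couldn': 'MD', "'t": 'POS'}
--
--
-- def change_tag(tokens, tagged_t):
--     # Mutates tagged_t in place, like the original.
--     seen = {}
--     for i, w in enumerate(tokens):
--         if w not in seen:
--             seen[w] = i
--     for w, tag in TAG_MAP.items():
--         if w in seen:
--             tagged_t[seen[w]] = (w, tag)
--     return tagged_t
-- ===== Notes on version B (the rewrite author's own statement) =====
-- stated objective: alternative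
-- what changed: A rescans tokens with list.index inside every loop iteration and re-writes slots repeatedly for duplicate tokens; B builds a first-occurrence index table in one pass and then writes each override once, driven by a single pass over the fixed word->tag table.
import Mathlib
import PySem

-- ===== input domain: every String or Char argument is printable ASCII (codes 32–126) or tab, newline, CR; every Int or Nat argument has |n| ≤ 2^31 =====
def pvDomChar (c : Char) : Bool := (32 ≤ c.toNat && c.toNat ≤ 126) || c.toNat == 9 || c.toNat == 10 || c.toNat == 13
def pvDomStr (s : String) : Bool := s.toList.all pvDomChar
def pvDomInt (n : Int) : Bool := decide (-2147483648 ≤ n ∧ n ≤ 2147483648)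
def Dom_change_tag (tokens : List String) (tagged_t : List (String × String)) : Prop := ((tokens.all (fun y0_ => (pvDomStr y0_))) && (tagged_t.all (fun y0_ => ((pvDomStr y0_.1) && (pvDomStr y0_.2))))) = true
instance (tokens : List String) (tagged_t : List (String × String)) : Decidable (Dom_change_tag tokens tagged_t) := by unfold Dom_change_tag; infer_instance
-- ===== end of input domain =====

-- B replaces A's per-token scan-and-index loop by a first-occurrence index table plus a
-- single pass over the fixed tag table (objective: alternative decomposition).
-- Both Pythons mutate tagged_t in place; the equivalence proved here is about the return value.

-- ===== PORT A =====
-- tokens.index(w): inside the loop w ∈ tokens, so index? is always some; getD 0 is unreachable.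
def pyIndexOf (tokens : List String) (w : String) : Nat :=
  (PySem.List.index? tokens w).getD 0

-- tagged_t[i] = v : List.set is a no-op out of range; Python raises IndexError there — excluded by Pre_.
def change_tag (tokens : List String) (tagged_t : List (String × String)) : List (String × String) :=
  tokens.foldl (fun acc w =>
    let acc := if w == "i" then acc.set (pyIndexOf tokens w) (w, "PRP") else acc
    let acc := if w == "don" || w == "doesn" || w == "didn" then acc.set (pyIndexOf tokens w) (w, "VB") else acc
    let acc := if w == "wouldn" || w == "shouldn" || w == "couldn" then acc.set (pyIndexOf tokens w) (w, "MD") else acc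
    let acc := if w == "'t" then acc.set (pyIndexOf tokens w) (w, "POS") else acc
    acc) tagged_t

-- ===== PORT B =====
def TAG_MAP : List (String × String) :=
  [("i", "PRP"), ("don", "VB"), ("doesn", "VB"), ("didn", "VB"),
   ("wouldn", "MD"), ("shouldn", "MD"), ("couldn", "MD"), ("'t", "POS")]

-- first pass of Source B: seen[w] = first index of w (enumerate indices are ≥ 0, so .toNat is exact)
def buildSeen (tokens : List String) : PySem.Dict String Int :=
  (PySem.List.enumerate tokens).foldl
    (fun (d : PySem.Dict String Int) p => if d.contains p.2 then d else d.insert p.2 p.1)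
    PySem.Dict.empty

def change_tag_alt (tokens : List String) (tagged_t : List (String × String)) : List (String × String) :=
  let seen := buildSeen tokens
  TAG_MAP.foldl (fun acc p =>
    match seen.get? p.1 with
    | some i => acc.set i.toNat p    -- tagged_t[seen[w]] = (w, tag); IndexError excluded by Pre_
    | none => acc) tagged_t

-- ===== PRECONDITION & SPEC =====
-- Pre_ excludes exactly the inputs where Python raises IndexError: a special word whose
-- first occurrence in tokens lies at or beyond the end of tagged_t.
def Pre_change_tag (tokens : List String) (tagged_t : List (String × String)) : Prop :=
  ∀ w ∈ ["i", "don", "doesn", "didn", "wouldn", "shouldn", "couldn", "'t"],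
    w ∈ tokens → tokens.idxOf w < tagged_t.length
instance (tokens : List String) (tagged_t : List (String × String)) : Decidable (Pre_change_tag tokens tagged_t) := by unfold Pre_change_tag; infer_instance

def pvWitness_change_tag : List String × (List (String × String)) :=
  (["i", "don", "you", "don"], [("i", "NN"), ("don", "NN"), ("you", "NN"), ("don", "NN")])

def Spec_change_tag (tokens : List String) (tagged_t : List (String × String)) (out : List (String × String)) : Prop := out = change_tag_alt tokens tagged_t
instance (tokens : List String) (tagged_t : List (String × String)) (out : List (String × String)) : Decidable (Spec_change_tag tokens tagged_t out) := by unfold Spec_change_tag; infer_instance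

-- ===== CLAIM (what is proved, stated in full; the proofs are below) =====
def Claim_equal_change_tag : Prop := ∀ (tokens : List String) (tagged_t : List (String × String)), Dom_change_tag tokens tagged_t → Pre_change_tag tokens tagged_t → Spec_change_tag tokens tagged_t (change_tag tokens tagged_t)


-- ===== LEMMAS AND PROOFS =====

-- the override tag of a word, read off the tag table (proof-side helper)
def specTag (w : String) : Option String :=
  (TAG_MAP.find? (fun p => p.1 == w)).map (·.2)

-- the entry the programs write at position j, if any
def overrideAt (tokens : List String) (j : Nat) : Option (String × String) :=
  tokens[j]?.bind (fun w => (specTag w).map (fun t => (w, t)))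

-- A's if-chain collapses to one write driven by specTag
theorem stepA_eq (tokens : List String) (acc : List (String × String)) (w : String) :
    (let a1 := if w == "i" then acc.set (pyIndexOf tokens w) (w, "PRP") else acc
     let a2 := if w == "don" || w == "doesn" || w == "didn" then a1.set (pyIndexOf tokens w) (w, "VB") else a1
     let a3 := if w == "wouldn" || w == "shouldn" || w == "couldn" then a2.set (pyIndexOf tokens w) (w, "MD") else a2
     if w == "'t" then a3.set (pyIndexOf tokens w) (w, "POS") else a3) =
    (match specTag w with
     | some t => acc.set (pyIndexOf tokens w) (w, t)
     | none => acc) := by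
  rcases eq_or_ne w "i" with h | h1
  · subst h; simp [specTag, TAG_MAP]
  rcases eq_or_ne w "don" with h | h2
  · subst h; simp [specTag, TAG_MAP]
  rcases eq_or_ne w "doesn" with h | h3
  · subst h; simp [specTag, TAG_MAP]
  rcases eq_or_ne w "didn" with h | h4
  · subst h; simp [specTag, TAG_MAP]
  rcases eq_or_ne w "wouldn" with h | h5
  · subst h; simp [specTag, TAG_MAP]
  rcases eq_or_ne w "shouldn" with h | h6
  · subst h; simp [specTag, TAG_MAP]
  rcases eq_or_ne w "couldn" with h | h7
  · subst h; simp [specTag, TAG_MAP]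
  rcases eq_or_ne w "'t" with h | h8
  · subst h; simp [specTag, TAG_MAP]
  simp [specTag, TAG_MAP, List.find?, h1, h2, h3, h4, h5, h6, h7, h8,
        beq_eq_false_iff_ne.mpr (Ne.symm h1), beq_eq_false_iff_ne.mpr (Ne.symm h2),
        beq_eq_false_iff_ne.mpr (Ne.symm h3), beq_eq_false_iff_ne.mpr (Ne.symm h4),
        beq_eq_false_iff_ne.mpr (Ne.symm h5), beq_eq_false_iff_ne.mpr (Ne.symm h6),
        beq_eq_false_iff_ne.mpr (Ne.symm h7), beq_eq_false_iff_ne.mpr (Ne.symm h8)]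

def stepA (tokens : List String) (acc : List (String × String)) (w : String) :
    List (String × String) :=
  match specTag w with
  | some t => acc.set (pyIndexOf tokens w) (w, t)
  | none => acc

theorem stepA_none (tokens : List String) (acc : List (String × String)) (w : String)
    (h : specTag w = none) : stepA tokens acc w = acc := by
  unfold stepA; rw [h]

theorem stepA_some (tokens : List String) (acc : List (String × String)) (w t : String)
    (h : specTag w = some t) :
    stepA tokens acc w = acc.set (pyIndexOf tokens w) (w, t) := by
  unfold stepA; rw [h]

theorem change_tag_eq_foldA (tokens : List String) (tagged_t : List (String × String)) :
    change_tag tokens tagged_t = tokens.foldl (stepA tokens) tagged_t := by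
  unfold change_tag
  apply PySem.List.foldl_congr_mem
  intro acc w _
  exact stepA_eq tokens acc w

theorem length_foldA (tokens L : List String) (acc : List (String × String)) :
    (L.foldl (stepA tokens) acc).length = acc.length := by
  induction L generalizing acc with
  | nil => rfl
  | cons x L ih =>
    simp only [List.foldl_cons, ih]
    unfold stepA
    cases specTag x <;> simp

theorem pyIndexOf_eq_idxOf (tokens : List String) (w : String) (h : w ∈ tokens) :
    pyIndexOf tokens w = tokens.idxOf w := by
  unfold pyIndexOf
  rw [PySem.List.index?_eq_idxOf?]
  rcases ho : List.idxOf? w tokens with _ | k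
  · rw [List.idxOf?_eq_none_iff] at ho; exact absurd h ho
  · rw [List.idxOf_eq_getD_idxOf?, ho]; rfl

theorem specTag_mem_keys (w : String) (t : String) (h : specTag w = some t) :
    (w, t) ∈ TAG_MAP := by
  unfold specTag at h
  rcases Option.map_eq_some_iff.mp h with ⟨p, hp, hpt⟩
  have hmem := List.mem_of_find?_eq_some hp
  have hkey : p.1 = w := by
    have := List.find?_some hp
    simpa using this
  rw [← hpt, ← hkey]
  exact hmem

theorem tagmap_specTag : ∀ p ∈ TAG_MAP, specTag p.1 = some p.2 := by decide

theorem overrideAt_of_idxOf (tokens : List String) (w t : String) (hw : w ∈ tokens)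
    (ht : specTag w = some t) : overrideAt tokens (tokens.idxOf w) = some (w, t) := by
  unfold overrideAt
  rw [List.getElem?_eq_getElem (List.idxOf_lt_length_of_mem hw),
      List.getElem_idxOf (List.idxOf_lt_length_of_mem hw)]
  simp [ht]

-- pointwise characterisation of A's fold, over any sublist L of tokens
theorem foldA_getElem (tokens : List String) (L : List String)
    (acc : List (String × String)) (j : Nat)
    (hsub : ∀ w ∈ L, w ∈ tokens)
    (hpre : ∀ w ∈ L, (specTag w).isSome → tokens.idxOf w < acc.length) :
    (L.foldl (stepA tokens) acc)[j]? =
      if ∃ w ∈ L, (specTag w).isSome ∧ tokens.idxOf w = j then overrideAt tokens j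
      else acc[j]? := by
  induction L using List.reverseRecOn with
  | nil => simp
  | append_singleton L w ih =>
    have hsub' : ∀ v ∈ L, v ∈ tokens := fun v hv => hsub v (by simp [hv])
    have hpre' : ∀ v ∈ L, (specTag v).isSome → tokens.idxOf v < acc.length :=
      fun v hv => hpre v (by simp [hv])
    have hwmem : w ∈ tokens := hsub w (by simp)
    rw [List.foldl_append, List.foldl_cons, List.foldl_nil]
    cases hst : specTag w with
    | none =>
      rw [stepA_none tokens _ w hst, ih hsub' hpre']
      congr 1
      simp only [eq_iff_iff]
      constructor
      · rintro ⟨v, hv, hs, hj⟩; exact ⟨v, by simp [hv], hs, hj⟩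
      · rintro ⟨v, hv, hs, hj⟩
        rcases List.mem_append.mp hv with hv' | hv'
        · exact ⟨v, hv', hs, hj⟩
        · simp only [List.mem_singleton] at hv'
          subst hv'; rw [hst] at hs; simp at hs
    | some t =>
      rw [stepA_some tokens _ w t hst, pyIndexOf_eq_idxOf tokens w hwmem]
      by_cases hj : tokens.idxOf w = j
      · subst hj
        have hlt : tokens.idxOf w < (L.foldl (stepA tokens) acc).length := by
          rw [length_foldA]
          exact hpre w (by simp) (by simp [hst])
        rw [List.getElem?_set_self hlt]
        rw [if_pos ⟨w, by simp, by simp [hst], rfl⟩]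
        exact (overrideAt_of_idxOf tokens w t hwmem hst).symm
      · rw [List.getElem?_set_ne hj, ih hsub' hpre']
        congr 1
        simp only [eq_iff_iff]
        constructor
        · rintro ⟨v, hv, hs, hj'⟩; exact ⟨v, by simp [hv], hs, hj'⟩
        · rintro ⟨v, hv, hs, hj'⟩
          rcases List.mem_append.mp hv with hv' | hv'
          · exact ⟨v, hv', hs, hj'⟩
          · simp only [List.mem_singleton] at hv'
            subst hv'; exact absurd hj' hj

-- the seen table of B holds exactly the first-occurrence index of each token
theorem buildSeen_aux (tokens : List String) (s : Int) (d : PySem.Dict String Int)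
    (w : String) :
    (((PySem.List.enumerate tokens s).foldl
        (fun (d : PySem.Dict String Int) p => if d.contains p.2 then d else d.insert p.2 p.1)
        d).get? w) =
      match d.get? w with
      | some v => some v
      | none => if w ∈ tokens then some (s + (tokens.idxOf w : Int)) else none := by
  induction tokens generalizing s d with
  | nil => simp [PySem.List.enumerate_nil]; cases d.get? w <;> simp
  | cons x rest ih =>
    rw [PySem.List.enumerate_cons, List.foldl_cons]
    dsimp only
    by_cases hc : d.contains x
    · rw [if_pos hc, ih]
      rcases eq_or_ne w x with h | h
      · subst h
        have hs : (d.get? w).isSome := by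
          rw [← PySem.Dict.contains_eq_isSome_get?]; exact hc
        rcases Option.isSome_iff_exists.mp hs with ⟨v, hv⟩
        simp [hv]
      · cases hv : d.get? w with
        | some v => simp
        | none =>
          simp only [List.mem_cons]
          rw [List.idxOf_cons_ne rest (Ne.symm h)]
          rcases em (w ∈ rest) with hm | hm
          · simp [hm, h]; ring_nf
          · simp [hm, h]
    · rw [if_neg hc, ih]
      rcases eq_or_ne w x with h | h
      · subst h
        have hd : d.get? w = none := by
          apply Option.not_isSome_iff_eq_none.mp
          rw [← PySem.Dict.contains_eq_isSome_get?]; simpa using hc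
        rw [PySem.Dict.get?_insert_self d w s, hd]
        simp
      · rw [PySem.Dict.get?_insert_of_ne d s h]
        cases hv : d.get? w with
        | some v => simp
        | none =>
          simp only [List.mem_cons]
          rw [List.idxOf_cons_ne rest (Ne.symm h)]
          rcases em (w ∈ rest) with hm | hm
          · simp [hm, h]; ring_nf
          · simp [hm, h]

theorem buildSeen_get? (tokens : List String) (w : String) :
    (buildSeen tokens).get? w =
      if w ∈ tokens then some ((tokens.idxOf w : Nat) : Int) else none := by
  unfold buildSeen
  rw [buildSeen_aux]
  simp [PySem.Dict.empty, PySem.Dict.get?]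

-- pointwise characterisation of B's fold, over any sub-table L of TAG_MAP
theorem length_foldB (tokens : List String) (L : List (String × String))
    (acc : List (String × String)) :
    (L.foldl (fun acc p =>
        match (buildSeen tokens).get? p.1 with
        | some i => acc.set i.toNat p
        | none => acc) acc).length = acc.length := by
  induction L generalizing acc with
  | nil => rfl
  | cons q L ih =>
    simp only [List.foldl_cons, ih]
    cases (buildSeen tokens).get? q.1 <;> simp

theorem foldB_getElem (tokens : List String) (L : List (String × String))
    (acc : List (String × String)) (j : Nat)
    (htag : ∀ p ∈ L, specTag p.1 = some p.2)
    (hpre : ∀ p ∈ L, p.1 ∈ tokens → tokens.idxOf p.1 < acc.length) :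
    (L.foldl (fun acc p =>
        match (buildSeen tokens).get? p.1 with
        | some i => acc.set i.toNat p
        | none => acc) acc)[j]? =
      if ∃ p ∈ L, p.1 ∈ tokens ∧ tokens.idxOf p.1 = j then overrideAt tokens j
      else acc[j]? := by
  induction L using List.reverseRecOn with
  | nil => simp
  | append_singleton L p ih =>
    have htag' : ∀ q ∈ L, specTag q.1 = some q.2 := fun q hq => htag q (by simp [hq])
    have hpre' : ∀ q ∈ L, q.1 ∈ tokens → tokens.idxOf q.1 < acc.length :=
      fun q hq => hpre q (by simp [hq])
    rw [List.foldl_append, List.foldl_cons, List.foldl_nil]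
    rw [buildSeen_get? tokens p.1]
    by_cases hm : p.1 ∈ tokens
    · rw [if_pos hm]
      simp only [Int.toNat_natCast]
      by_cases hj : tokens.idxOf p.1 = j
      · subst hj
        rw [List.getElem?_set_self (by rw [length_foldB]; exact hpre p (by simp) hm)]
        rw [if_pos ⟨p, by simp, hm, rfl⟩]
        exact (overrideAt_of_idxOf tokens p.1 p.2 hm (htag p (by simp))).symm
      · rw [List.getElem?_set_ne hj, ih htag' hpre']
        congr 1
        simp only [eq_iff_iff]
        constructor
        · rintro ⟨q, hq, hqm, hqj⟩; exact ⟨q, by simp [hq], hqm, hqj⟩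
        · rintro ⟨q, hq, hqm, hqj⟩
          rcases List.mem_append.mp hq with hq' | hq'
          · exact ⟨q, hq', hqm, hqj⟩
          · simp only [List.mem_singleton] at hq'
            subst hq'; exact absurd hqj hj
    · rw [if_neg hm, ih htag' hpre']
      congr 1
      simp only [eq_iff_iff]
      constructor
      · rintro ⟨q, hq, hqm, hqj⟩; exact ⟨q, by simp [hq], hqm, hqj⟩
      · rintro ⟨q, hq, hqm, hqj⟩
        rcases List.mem_append.mp hq with hq' | hq'
        · exact ⟨q, hq', hqm, hqj⟩
        · simp only [List.mem_singleton] at hq'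
          subst hq'; exact absurd hqm hm

theorem tagmap_keys : ∀ p ∈ TAG_MAP,
    p.1 ∈ ["i", "don", "doesn", "didn", "wouldn", "shouldn", "couldn", "'t"] := by decide

theorem specTag_keys (w : String) (h : (specTag w).isSome) :
    w ∈ ["i", "don", "doesn", "didn", "wouldn", "shouldn", "couldn", "'t"] := by
  rcases Option.isSome_iff_exists.mp h with ⟨t, ht⟩
  have := specTag_mem_keys w t ht
  have := tagmap_keys (w, t) this
  simpa using this

-- ===== VERDICT (by name: the statement is the Claim_ definition above) =====
theorem change_tag_spec : Claim_equal_change_tag := by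
  unfold Claim_equal_change_tag
  intro tokens tagged_t _ hpre
  unfold Spec_change_tag
  have hpreA : ∀ w ∈ tokens, (specTag w).isSome → tokens.idxOf w < tagged_t.length :=
    fun w hw hs => hpre w (specTag_keys w hs) hw
  have hpreB : ∀ p ∈ TAG_MAP, p.1 ∈ tokens → tokens.idxOf p.1 < tagged_t.length :=
    fun p hp hm => hpre p.1 (tagmap_keys p hp) hm
  apply List.ext_getElem?_iff.mpr
  intro j
  rw [change_tag_eq_foldA]
  rw [foldA_getElem tokens tokens tagged_t j (fun _ h => h) hpreA]
  show _ = (change_tag_alt tokens tagged_t)[j]?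
  unfold change_tag_alt
  rw [foldB_getElem tokens TAG_MAP tagged_t j tagmap_specTag hpreB]
  congr 1
  simp only [eq_iff_iff]
  constructor
  · rintro ⟨w, hw, hs, hj⟩
    rcases Option.isSome_iff_exists.mp hs with ⟨t, ht⟩
    exact ⟨(w, t), specTag_mem_keys w t ht, hw, hj⟩
  · rintro ⟨p, hp, hm, hj⟩
    exact ⟨p.1, hm, by simp [tagmap_specTag p hp], hj⟩
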